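-- pv_equiv track=rewrite | github.com/davidskeck/advent-of-code | AOC_2023/13/solve.py | get_reflections
-- ===== SOURCE A (Python) =====
-- def check_for_smudge(one, two):
--     diff_count = 0
--     for idx, sym in enumerate(one):
--         if sym != two[idx]:
--             diff_count += 1
--         if diff_count >= 2:
--             break
--
--     return diff_count == 1
--
-- def get_reflections(pattern_data, vertical=False, part_two=False):
--     if vertical:
--         pattern_data = ["".join(data) for data in list(zip(*pattern_data[::-1]))]
--
--     for i in range(len(pattern_data) // 2 * 2):
--         smudge_fixed = False
--         curr_first = i
--         curr_second = i + 1
--         match = True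
--         while match and curr_first >= 0 and curr_second < len(pattern_data):
--             match = pattern_data[curr_first] == pattern_data[curr_second]
--             if not match:
--                 if part_two and not smudge_fixed:
--                     smudge_fixed = check_for_smudge(pattern_data[curr_first], pattern_data[curr_second])
--                     if smudge_fixed:
--                         match = True
--             curr_first -= 1
--             curr_second += 1
--         if match:
--             if not part_two:
--                 return i + 1
--             elif smudge_fixed:
--                 return i + 1
-- ===== SOURCE B (Python) =====
-- def get_reflections(pattern_data, vertical=False, part_two=False):
--     if vertical:
--         pattern_data = ["".join(data) for data in list(zip(*pattern_data[::-1]))]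
--
--     target = 1 if part_two else 0
--     for i in range(len(pattern_data) // 2 * 2):
--         above = pattern_data[:i + 1][::-1]
--         below = pattern_data[i + 1:]
--         if sum(x != y for u, v in zip(above, below) for x, y in zip(u, v)) == target:
--             return i + 1
-- ===== Notes on version B (the rewrite author's own statement) =====
-- stated objective: simpler
-- what changed: Replaces the two-pointer outward expansion with its match/smudge_fixed state machine and the check_for_smudge helper by the standard slice formulation: for each candidate line take the reversed block above and the block below, and decide by one flat sum of character mismatches over the zipped slices compared to a 0/1 target; no while loop, no pointers, no early exit, no flags.
-- outside the precondition, e.g. on get_reflections(['ab', 'abc'], False, False): A returns 2, B returns 1; on get_reflections(['ab', 'a'], False, True): A raises IndexError, B returns None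
import Mathlib
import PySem

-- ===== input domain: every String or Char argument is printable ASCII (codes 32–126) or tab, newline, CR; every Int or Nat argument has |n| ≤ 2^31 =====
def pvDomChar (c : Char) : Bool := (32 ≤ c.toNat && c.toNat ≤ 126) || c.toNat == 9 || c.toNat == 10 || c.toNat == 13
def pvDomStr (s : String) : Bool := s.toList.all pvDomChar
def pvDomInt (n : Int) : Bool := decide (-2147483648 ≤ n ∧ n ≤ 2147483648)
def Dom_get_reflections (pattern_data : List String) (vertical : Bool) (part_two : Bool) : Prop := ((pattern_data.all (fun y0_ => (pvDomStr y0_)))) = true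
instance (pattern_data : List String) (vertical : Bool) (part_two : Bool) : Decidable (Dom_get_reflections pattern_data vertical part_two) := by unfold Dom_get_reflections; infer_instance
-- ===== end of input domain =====

-- B replaces A's two-pointer expansion with its match/smudge two-flag state machine and the
-- check_for_smudge helper by slicing: reversed block above vs block below, decided by one flat
-- mismatch sum compared to a 0/1 target; objective: simpler.


-- ===== PORT A =====
-- helper shared by both ports: the identical Python first line
-- `pattern_data = ["".join(data) for data in list(zip(*pattern_data[::-1]))]`.
-- zip(*rows) truncates to the shortest row, so j < every row's length and the ' '
-- default of getD is never consulted (exact on all inputs).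
def pvMinLen : List (List Char) → Nat
  | [] => 0
  | r :: rs => rs.foldl (fun m x => Nat.min m x.length) r.length

def pvZipStar (rows : List (List Char)) : List (List Char) :=
  match rows with
  | [] => []
  | _ => (List.range (pvMinLen rows)).map (fun j => rows.map (fun r => r.getD j ' '))

-- rows as List Char (strings compared elementwise, same equality as Python's on str)
def pvRows (pattern_data : List String) (vertical : Bool) : List (List Char) :=
  if vertical then pvZipStar ((pattern_data.map String.toList).reverse)
  else pattern_data.map String.toList

-- the `for idx, sym in enumerate(one)` loop of check_for_smudge; pyGet? none would be
-- Python's IndexError (outside Pre_; the value returned there is never relied on)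
def cfsLoop (two : List Char) : List Char → Int → Int → Int
  | [], _, dc => dc
  | sym :: rest, idx, dc =>
    let dc' := match PySem.List.pyGet? two idx with
      | some c => if sym ≠ c then dc + 1 else dc
      | none => dc
    if dc' ≥ 2 then dc' else cfsLoop two rest (idx + 1) dc'

def check_for_smudge (one two : List Char) : Bool :=
  cfsLoop two one 0 0 == 1

-- A's inner while loop; fuel = rows.length + 1 always suffices (b grows each step)
def aWhile (rows : List (List Char)) (part_two : Bool) :
    Nat → Int → Int → Bool → Bool → Bool × Bool
  | 0, _, _, m, s => (m, s)
  | fuel + 1, a, b, m, s =>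
    if m = true ∧ 0 ≤ a ∧ b < (rows.length : Int) then
      let ra := (PySem.List.pyGet? rows a).getD []
      let rb := (PySem.List.pyGet? rows b).getD []
      if ra == rb then aWhile rows part_two fuel (a - 1) (b + 1) true s
      else if part_two = true ∧ s = false then
        let sf := check_for_smudge ra rb
        aWhile rows part_two fuel (a - 1) (b + 1) sf sf
      else aWhile rows part_two fuel (a - 1) (b + 1) false s
    else (m, s)

def aOuter (rows : List (List Char)) (part_two : Bool) : List Int → Option Int
  | [] => none
  | i :: rest =>
    let ms := aWhile rows part_two (rows.length + 1) i (i + 1) true false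
    if ms.1 = true then
      if part_two = false then some (i + 1)
      else if ms.2 = true then some (i + 1)
      else aOuter rows part_two rest
    else aOuter rows part_two rest

def get_reflections (pattern_data : List String) (vertical : Bool) (part_two : Bool) : Option Int :=
  let rows := pvRows pattern_data vertical
  aOuter rows part_two (PySem.List.pyRange 0 (PySem.Int.floordiv (rows.length : Int) 2 * 2) 1)

-- ===== PORT B =====
-- `sum(x != y for u, v in zip(above, below) for x, y in zip(u, v))`:
-- the inner 0/1-sum over one row pair IS countP (PySem.List.sum_map_ite_one_zero)
def bTotal : List (List Char × List Char) → Int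
  | [] => 0
  | p :: rest => ((p.1.zip p.2).countP (fun q => q.1 ≠ q.2) : Int) + bTotal rest

def bOuter (rows : List (List Char)) (target : Int) : List Int → Option Int
  | [] => none
  | i :: rest =>
    let above := (PySem.List.slice rows none (some (i + 1))).reverse  -- pattern_data[:i+1][::-1]
    let below := PySem.List.slice rows (some (i + 1)) none            -- pattern_data[i+1:]
    if bTotal (above.zip below) == target then some (i + 1)
    else bOuter rows target rest

def get_reflections_alt (pattern_data : List String) (vertical : Bool) (part_two : Bool) : Option Int :=
  let rows := pvRows pattern_data vertical
  let target : Int := if part_two then 1 else 0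
  bOuter rows target (PySem.List.pyRange 0 (PySem.Int.floordiv (rows.length : Int) 2 * 2) 1)

-- ===== PRECONDITION & SPEC =====
-- Pre_ excludes non-rectangular grids in the horizontal (vertical = false) case: there A can
-- raise IndexError in part two, and where it returns, comparing only the overlapping prefix of
-- two unequal-length rows is an accident of A's implementation no caller would specify.
def Pre_get_reflections (pattern_data : List String) (vertical : Bool) (part_two : Bool) : Prop :=
  vertical = true ∨ ∀ s ∈ pattern_data, ∀ t ∈ pattern_data, s.toList.length = t.toList.length

instance (pattern_data : List String) (vertical : Bool) (part_two : Bool) : Decidable (Pre_get_reflections pattern_data vertical part_two) := by unfold Pre_get_reflections; infer_instance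

def pvWitness_get_reflections : List String × Bool × Bool := (["#.", "#.", ".."], false, false)

def Spec_get_reflections (pattern_data : List String) (vertical : Bool) (part_two : Bool) (out : Option Int) : Prop := out = get_reflections_alt pattern_data vertical part_two
instance (pattern_data : List String) (vertical : Bool) (part_two : Bool) (out : Option Int) : Decidable (Spec_get_reflections pattern_data vertical part_two out) := by unfold Spec_get_reflections; infer_instance

-- ===== CLAIM (what is proved, stated in full; the proofs are below) =====
def Claim_equal_get_reflections : Prop := ∀ (pattern_data : List String) (vertical : Bool) (part_two : Bool), Dom_get_reflections pattern_data vertical part_two → Pre_get_reflections pattern_data vertical part_two → Spec_get_reflections pattern_data vertical part_two (get_reflections pattern_data vertical part_two)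

-- ===== LEMMAS AND PROOFS =====

-- the pair list B's slices produce, indexed the way A's pointers walk it
def pairsI (rows : List (List Char)) (a b : Int) : List (List Char × List Char) :=
  ((rows.take (a + 1).toNat).reverse).zip (rows.drop b.toNat)

theorem bTotal_nonneg : ∀ l, 0 ≤ bTotal l := by
  intro l
  induction l with
  | nil => simp [bTotal]
  | cons p rest ih => simp only [bTotal]; positivity

theorem pairsI_nil_left (rows : List (List Char)) (a b : Int) (ha : a < 0) :
    pairsI rows a b = [] := by
  have : (a + 1).toNat = 0 := by omega
  simp [pairsI, this]

theorem pairsI_nil_right (rows : List (List Char)) (a b : Int)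
    (hb : (rows.length : Int) ≤ b) : pairsI rows a b = [] := by
  have : rows.length ≤ b.toNat := by omega
  simp [pairsI, List.drop_eq_nil_of_le this]

theorem pairsI_cons (rows : List (List Char)) (a b : Int)
    (ha0 : 0 ≤ a) (ha : a < (rows.length : Int)) (hb0 : 0 ≤ b) (hb : b < (rows.length : Int)) :
    pairsI rows a b = (rows[a.toNat]'(by omega), rows[b.toNat]'(by omega)) ::
      pairsI rows (a - 1) (b + 1) := by
  have ha' : a.toNat < rows.length := by omega
  have hb' : b.toNat < rows.length := by omega
  have h1 : (a + 1).toNat = a.toNat + 1 := by omega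
  have h2 : (a - 1 + 1).toNat = a.toNat := by omega
  have h3 : (b + 1).toNat = b.toNat + 1 := by omega
  have htake : rows.take (a.toNat + 1) = rows.take a.toNat ++ [rows[a.toNat]] := by
    rw [List.take_succ]
    simp [List.getElem?_eq_getElem ha']
  have hdrop : rows.drop b.toNat = rows[b.toNat] :: rows.drop (b.toNat + 1) :=
    List.drop_eq_getElem_cons hb'
  unfold pairsI
  simp only [h1, h2, h3, htake, hdrop, List.reverse_append, List.reverse_cons,
    List.reverse_nil, List.nil_append, List.cons_append, List.zip_cons_cons]

theorem ham_zero_iff : ∀ (x y : List Char), x.length = y.length →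
    ((x.zip y).countP (fun p => decide (p.1 ≠ p.2)) = 0 ↔ x = y) := by
  intro x
  induction x with
  | nil =>
    intro y h
    cases y with
    | nil => simp
    | cons b ys => simp at h
  | cons a xs ih =>
    intro y h
    cases y with
    | nil => simp at h
    | cons b ys =>
      rw [List.zip_cons_cons, List.countP_cons]
      have hxy := ih ys (by simpa using h)
      by_cases hab : a = b
      · have hd : (decide ((a, b).1 ≠ (a, b).2)) = false := by simp [hab]
        rw [hd]
        simp only [if_false, add_zero, Bool.false_eq_true]
        rw [hxy]
        simp [hab]
      · have hd : (decide ((a, b).1 ≠ (a, b).2)) = true := by simp [hab]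
        rw [hd]
        simp [hab]

theorem cfsLoop_spec : ∀ (one rest pre : List Char) (dc : Int),
    one.length = rest.length → (dc = 0 ∨ dc = 1) →
    (cfsLoop (pre ++ rest) one (pre.length : Int) dc = 1 ↔
      dc + ((one.zip rest).countP (fun p => decide (p.1 ≠ p.2)) : Int) = 1) := by
  intro one
  induction one with
  | nil =>
    intro rest pre dc hlen hdc
    cases rest with
    | nil => simp [cfsLoop]
    | cons r rs => simp at hlen
  | cons sym os ih =>
    intro rest pre dc hlen hdc
    cases rest with
    | nil => simp at hlen
    | cons r rs =>
      have hget := PySem.List.pyGet?_append_length pre rs r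
      have hlen' : os.length = rs.length := by simpa using hlen
      have hstep : ∀ dc0 : Int, cfsLoop (pre ++ r :: rs) (sym :: os) (pre.length : Int) dc0
          = (if (if sym ≠ r then dc0 + 1 else dc0) ≥ 2 then (if sym ≠ r then dc0 + 1 else dc0)
             else cfsLoop (pre ++ r :: rs) os ((pre.length : Int) + 1) (if sym ≠ r then dc0 + 1 else dc0)) := by
        intro dc0
        rw [cfsLoop, hget]
      have hIH : ∀ dc1 : Int, dc1 = 0 ∨ dc1 = 1 →
          (cfsLoop (pre ++ r :: rs) os ((pre.length : Int) + 1) dc1 = 1 ↔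
            dc1 + ((os.zip rs).countP (fun p => decide (p.1 ≠ p.2)) : Int) = 1) := by
        intro dc1 hdc1
        have IH := ih rs (pre ++ [r]) dc1 hlen' hdc1
        rw [show (pre ++ [r]) ++ rs = pre ++ r :: rs by simp] at IH
        rw [show (((pre ++ [r]).length : Nat) : Int) = (pre.length : Int) + 1 by simp] at IH
        exact IH
      by_cases hsr : sym = r
      · subst hsr
        have hd : (if sym ≠ sym then dc + 1 else dc) = dc := by simp
        rw [hstep, hd, if_neg (by omega)]
        rw [hIH dc hdc]
        have hc : ((sym :: os).zip (sym :: rs)).countP (fun p => decide (p.1 ≠ p.2))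
            = (os.zip rs).countP (fun p => decide (p.1 ≠ p.2)) := by
          simp
        rw [hc]
      · have hd : (if sym ≠ r then dc + 1 else dc) = dc + 1 := by simp [hsr]
        have hc : (((sym :: os).zip (r :: rs)).countP (fun p => decide (p.1 ≠ p.2)) : Int)
            = ((os.zip rs).countP (fun p => decide (p.1 ≠ p.2)) : Int) + 1 := by
          simp [hsr]
        have hnn : (0:Int) ≤ ((os.zip rs).countP (fun p => decide (p.1 ≠ p.2)) : Int) := by
          positivity
        rcases hdc with rfl | rfl
        · rw [hstep, hd, if_neg (by omega)]
          rw [hIH (0 + 1) (Or.inr (by norm_num))]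
          rw [hc]
          omega
        · rw [hstep, hd, if_pos (by omega)]
          rw [hc]
          omega

theorem cfs_iff (one two : List Char) (h : one.length = two.length) :
    check_for_smudge one two = true ↔
      (one.zip two).countP (fun p => decide (p.1 ≠ p.2)) = 1 := by
  have h0 := cfsLoop_spec one two [] 0 h (Or.inl rfl)
  simp only [List.nil_append, List.length_nil, Int.natCast_zero, zero_add] at h0
  rw [check_for_smudge, beq_iff_eq, h0]
  constructor <;> intro h' <;> exact_mod_cast h'

theorem aWhile_false (rows : List (List Char)) (p : Bool) :
    ∀ (fuel : Nat) (a b : Int) (s : Bool), aWhile rows p fuel a b false s = (false, s) := by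
  intro fuel a b s
  cases fuel <;> simp [aWhile]

theorem inner_eq (rows : List (List Char)) (L : Nat)
    (Hlen : ∀ r ∈ rows, r.length = L) (p : Bool) :
    ∀ (fuel : Nat) (a b : Int) (s : Bool),
      (rows.length : Int) - b < fuel → 0 ≤ b → a < (rows.length : Int) →
      (s = true → p = true) →
      (((aWhile rows p fuel a b true s).1 && (!p || (aWhile rows p fuel a b true s).2))
        = ((if s then (1:Int) else 0) + bTotal (pairsI rows a b) == (if p then 1 else 0))) := by
  intro fuel
  induction fuel with
  | zero =>
    intro a b s hfuel hb _ hs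
    have hnil : pairsI rows a b = [] := pairsI_nil_right rows a b (by omega)
    cases p <;> cases s <;> simp_all [aWhile, bTotal]
  | succ fuel ih =>
    intro a b s hfuel hb ha hs
    by_cases hc : 0 ≤ a ∧ b < (rows.length : Int)
    · have hga : PySem.List.pyGet? rows a = some (rows[a.toNat]'(by omega)) :=
        PySem.List.pyGet?_eq_some_getElem rows hc.1 ha
      have hgb : PySem.List.pyGet? rows b = some (rows[b.toNat]'(by omega)) :=
        PySem.List.pyGet?_eq_some_getElem rows hb hc.2
      set ra := rows[a.toNat]'(by omega) with hra
      set rb := rows[b.toNat]'(by omega) with hrb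
      have hla : ra.length = L := Hlen ra (by rw [hra]; exact List.getElem_mem _)
      have hlb : rb.length = L := Hlen rb (by rw [hrb]; exact List.getElem_mem _)
      have hlen : ra.length = rb.length := by rw [hla, hlb]
      set cnt := (ra.zip rb).countP (fun q => decide (q.1 ≠ q.2)) with hcnt
      set t : Int := if s then 1 else 0 with ht
      set T : Int := if p then 1 else 0 with hT
      have hpair : pairsI rows a b = (ra, rb) :: pairsI rows (a - 1) (b + 1) :=
        pairsI_cons rows a b hc.1 ha hb hc.2
      have hbt : bTotal (pairsI rows a b) = (cnt : Int) + bTotal (pairsI rows (a - 1) (b + 1)) := by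
        rw [hpair]; rfl
      set rest := bTotal (pairsI rows (a - 1) (b + 1)) with hrest
      have hrnn : 0 ≤ rest := bTotal_nonneg _
      have hfuel' : (rows.length : Int) - (b + 1) < fuel := by push_cast at hfuel ⊢; omega
      have hAstep : aWhile rows p (fuel + 1) a b true s =
          (if ra == rb then aWhile rows p fuel (a - 1) (b + 1) true s
           else if p = true ∧ s = false then
             aWhile rows p fuel (a - 1) (b + 1) (check_for_smudge ra rb) (check_for_smudge ra rb)
           else aWhile rows p fuel (a - 1) (b + 1) false s) := by
        rw [aWhile]
        simp [hc.1, hc.2, hga, hgb]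
      rw [hAstep, hbt]
      have htT : t ≤ T := by
        rw [ht, hT]
        by_cases hs2 : s = true
        · rw [hs2, hs hs2]
        · simp only [Bool.not_eq_true] at hs2
          rw [hs2]
          cases p <;> norm_num
      by_cases h0 : cnt = 0
      · have heq : ra = rb := (ham_zero_iff ra rb hlen).1 h0
        have hbeq : (ra == rb) = true := by simp [heq]
        rw [hbeq, if_pos rfl]
        have hsum : t + ((cnt : Int) + rest) = t + rest := by
          rw [h0]; push_cast; ring
        rw [hsum]
        exact ih (a - 1) (b + 1) s hfuel' (by omega) (by omega) hs
      · have hne : ra ≠ rb := fun h => h0 ((ham_zero_iff ra rb hlen).2 h)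
        have hbeq : (ra == rb) = false := by simp [hne]
        rw [hbeq]
        simp only [Bool.false_eq_true, if_false]
        have hcnt1 : 1 ≤ cnt := Nat.one_le_iff_ne_zero.2 h0
        rcases Bool.eq_false_or_eq_true p with hp' | hp'
        · -- p = true
          subst hp'
          rcases Bool.eq_false_or_eq_true s with hs' | hs'
          · -- s = true: a further mismatch after the fixed smudge fails
            subst hs'
            have hT' : T = 1 := by rw [hT]; norm_num
            have ht' : t = 1 := by rw [ht]; norm_num
            rw [if_neg (by simp)]
            rw [aWhile_false]
            simp only [Bool.false_and]
            symm
            rw [beq_eq_false_iff_ne]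
            omega
          · -- s = false: the smudge check
            subst hs'
            have hT' : T = 1 := by rw [hT]; norm_num
            have ht' : t = 0 := by rw [ht]; norm_num
            rw [if_pos ⟨rfl, rfl⟩]
            by_cases h1 : cnt = 1
            · have hsf : check_for_smudge ra rb = true := (cfs_iff ra rb hlen).2 h1
              rw [hsf]
              have hIH := ih (a - 1) (b + 1) true hfuel' (by omega) (by omega) (fun _ => rfl)
              rw [hIH]
              have hl : t + ((cnt : Int) + rest) = (if (true : Bool) then (1:Int) else 0) + rest := by
                simp [ht', h1]
              rw [hl]
            · have hsf : check_for_smudge ra rb = false := by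
                cases hx : check_for_smudge ra rb
                · rfl
                · exact absurd ((cfs_iff ra rb hlen).1 hx) h1
              rw [hsf, aWhile_false]
              have h2 : 2 ≤ cnt := by omega
              simp only [Bool.false_and]
              symm
              rw [beq_eq_false_iff_ne]
              omega
        · -- p = false (part one): any mismatch fails
          subst hp'
          have hs0 : s = false := by
            cases hsx : s
            · rfl
            · exact absurd (hs hsx) (by simp)
          subst hs0
          have hT' : T = 0 := by rw [hT]; norm_num
          have ht' : t = 0 := by rw [ht]; norm_num
          rw [if_neg (by simp)]
          rw [aWhile_false]
          simp only [Bool.false_and]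
          symm
          rw [beq_eq_false_iff_ne]
          omega
    · have hA : aWhile rows p (fuel + 1) a b true s = (true, s) := by
        rw [aWhile]; simp [hc]
      have hnil : pairsI rows a b = [] := by
        rcases not_and_or.1 hc with h | h
        · exact pairsI_nil_left rows a b (by omega)
        · exact pairsI_nil_right rows a b (by omega)
      rw [hA, hnil]
      cases p <;> cases s <;> simp_all [bTotal]

theorem outer_eq (rows : List (List Char)) (L : Nat)
    (Hlen : ∀ r ∈ rows, r.length = L) (p : Bool) :
    ∀ (l : List Int), (∀ i ∈ l, 0 ≤ i ∧ i < (rows.length : Int)) →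
      aOuter rows p l = bOuter rows (if p then 1 else 0) l := by
  intro l
  induction l with
  | nil => intro _; simp [aOuter, bOuter]
  | cons i rest ih =>
    intro h
    have hi := h i (List.mem_cons_self)
    have hslA : PySem.List.slice rows none (some (i + 1)) = rows.take (i + 1).toNat :=
      PySem.List.slice_to rows (by omega)
    have hslB : PySem.List.slice rows (some (i + 1)) none = rows.drop (i + 1).toNat :=
      PySem.List.slice_from rows (by omega)
    have hd := inner_eq rows L Hlen p (rows.length + 1) i (i + 1) false
      (by push_cast; omega) (by omega) (by omega) (by simp)
    rw [aOuter, bOuter, hslA, hslB, ← ih (fun j hj => h j (List.mem_cons_of_mem _ hj))]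
    have hz : (rows.take (i + 1).toNat).reverse.zip (rows.drop (i + 1).toNat)
        = pairsI rows i (i + 1) := rfl
    rw [hz]
    rcases hms : aWhile rows p (rows.length + 1) i (i + 1) true false with ⟨m, s⟩
    rw [hms] at hd
    norm_num at hd
    rw [← hd]
    cases m <;> cases p <;> cases s <;> simp

theorem zipStar_len (rows : List (List Char)) : ∀ r ∈ pvZipStar rows, r.length = rows.length := by
  intro r hr
  cases rows with
  | nil => simp [pvZipStar] at hr
  | cons x xs =>
    simp only [pvZipStar, List.mem_map, List.mem_range] at hr
    obtain ⟨j, _, rfl⟩ := hr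
    simp

theorem rows_len (pd : List String) (v : Bool)
    (hpre : v = true ∨ ∀ s ∈ pd, ∀ t ∈ pd, s.toList.length = t.toList.length) :
    ∃ L, ∀ r ∈ pvRows pd v, r.length = L := by
  cases v with
  | true =>
    exact ⟨((pd.map String.toList).reverse).length, by
      simpa [pvRows] using zipStar_len ((pd.map String.toList).reverse)⟩
  | false =>
    rcases hpre with h | h
    · exact absurd h (by simp)
    · cases pd with
      | nil => exact ⟨0, by simp [pvRows]⟩
      | cons s rest =>
        refine ⟨s.toList.length, ?_⟩
        intro r hr
        simp only [pvRows, if_neg (by simp : ¬ (false = true)), List.mem_map] at hr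
        obtain ⟨t, ht, rfl⟩ := hr
        exact h t ht s (List.mem_cons_self)

-- ===== VERDICT (by name: the statement is the Claim_ definition above) =====
theorem get_reflections_spec : Claim_equal_get_reflections := by
  unfold Claim_equal_get_reflections
  intro pd v p2 _ hpre
  unfold Spec_get_reflections get_reflections get_reflections_alt
  obtain ⟨L, hL⟩ := rows_len pd v hpre
  apply outer_eq _ L hL
  intro i hi
  rw [PySem.List.mem_pyRange_one] at hi
  have hfd : PySem.Int.floordiv ((pvRows pd v).length : Int) 2 * 2 ≤ ((pvRows pd v).length : Int) := by
    rw [PySem.Int.floordiv_eq_ediv_of_pos (by norm_num)]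
    omega
  exact ⟨hi.1, by omega⟩
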